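-- pv_equiv track=rewrite | github.com/Abhilash-du/daily-coding-challenges | DataStructures/Queue/N_Integers_1_2_3.py | solve
-- ===== SOURCE A (Python) =====
-- from collections import deque
--
-- def solve(A):
--     queue = deque([1, 2, 3])
--     ans = []
--     for i in range(A):
--         element = queue.popleft()
--         ans.append(element)
--         for j in range(1, 4):
--             # append 1, 2 and 3 to the current number
--             queue.append(10 * element + j)
--     return ans
-- ===== SOURCE B (Python) =====
-- def solve(A):
--     ans = []
--     for i in range(A):
--         n = i + 1
--         digits = []
--         while n > 0:
--             r = n % 3
--             if r == 0:
--                 r = 3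
--                 n = n // 3 - 1
--             else:
--                 n = n // 3
--             digits = [r] + digits
--         num = 0
--         for d in digits:
--             num = 10 * num + d
--         ans.append(num)
--     return ans
-- ===== Notes on version B (the rewrite author's own statement) =====
-- stated objective: alternative
-- what changed: Replaces the BFS deque that expands each popped number into three queued children with a direct per-index computation: the i-th element is obtained arithmetically as the bijective base-3 representation of i folded into a decimal number, so no queue is maintained.
import Mathlib
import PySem

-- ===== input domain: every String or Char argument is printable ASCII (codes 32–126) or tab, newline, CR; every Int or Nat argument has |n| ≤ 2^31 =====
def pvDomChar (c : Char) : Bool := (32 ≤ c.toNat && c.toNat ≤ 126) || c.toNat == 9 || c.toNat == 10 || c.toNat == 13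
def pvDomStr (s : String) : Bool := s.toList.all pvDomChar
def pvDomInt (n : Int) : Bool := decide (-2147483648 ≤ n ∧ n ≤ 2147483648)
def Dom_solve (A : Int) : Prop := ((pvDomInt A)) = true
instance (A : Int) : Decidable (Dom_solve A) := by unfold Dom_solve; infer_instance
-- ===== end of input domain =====

-- B replaces A's BFS queue expansion by computing each element independently
-- from its 1-based index via bijective base-3 digits (objective: alternative).

-- ===== PORT A =====
-- one BFS step: pop the front, append it to ans, push its three children
def solveStepA (st : List Int × List Int) (_i : Int) : List Int × List Int :=
  match st with
  | (queue, ans) =>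
    match queue with
    | [] => (queue, ans)  -- dead branch: the queue is never empty (3 seeds, each pop adds 3)
    | element :: rest =>
        ((PySem.List.pyRange 1 4 1).foldl (fun q j => q ++ [10 * element + j]) rest,
         ans ++ [element])

def solve (A : Int) : List Int :=
  ((PySem.List.pyRange 0 A 1).foldl solveStepA ([1, 2, 3], [])).2

-- ===== PORT B =====
-- the while-loop of B: collect bijective base-3 digits of n, most significant first
def bdigits (n : Int) (digits : List Int) : List Int :=
  if h : 0 < n then
    let r := PySem.Int.mod n 3
    if r = 0 then bdigits (PySem.Int.floordiv n 3 - 1) (3 :: digits)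
    else bdigits (PySem.Int.floordiv n 3) (r :: digits)
  else digits
termination_by n.toNat
decreasing_by
  · rw [PySem.Int.floordiv_eq_ediv_of_pos (by omega)]; omega
  · rw [PySem.Int.floordiv_eq_ediv_of_pos (by omega)]; omega

def solve_alt (A : Int) : List Int :=
  (PySem.List.pyRange 0 A 1).foldl (fun ans i =>
    let digits := bdigits (i + 1) []
    let num := digits.foldl (fun num d => 10 * num + d) 0
    ans ++ [num]) []

-- ===== PRECONDITION & SPEC =====
def Spec_solve (A : Int) (out : List Int) : Prop := out = solve_alt A
instance (A : Int) (out : List Int) : Decidable (Spec_solve A out) := by unfold Spec_solve; infer_instance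

-- ===== CLAIM (what is proved, stated in full; the proofs are below) =====
def Claim_equal_solve : Prop := ∀ (A : Int), Dom_solve A → Spec_solve A (solve A)

-- ===== LEMMAS AND PROOFS =====

-- the n-th (1-based) positive integer whose decimal digits are all in {1,2,3}
def fseq : Nat → Int
  | 0 => 0
  | n + 1 => 10 * fseq (n / 3) + ((n % 3 : Nat) + 1)
decreasing_by omega

theorem bdigits_neg (n : Int) (acc : List Int) (h : ¬ 0 < n) : bdigits n acc = acc := by
  rw [bdigits]; simp [h]

theorem bdigits_pos (n : Int) (acc : List Int) (h : 0 < n) :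
    bdigits n acc = if PySem.Int.mod n 3 = 0
      then bdigits (PySem.Int.floordiv n 3 - 1) (3 :: acc)
      else bdigits (PySem.Int.floordiv n 3) (PySem.Int.mod n 3 :: acc) := by
  rw [bdigits]; simp [h]

theorem bdigits_acc (fuel : Nat) : ∀ (n : Int), n.toNat ≤ fuel → ∀ acc : List Int,
    bdigits n acc = bdigits n [] ++ acc := by
  induction fuel with
  | zero =>
    intro n hn acc
    have h : ¬ 0 < n := by omega
    rw [bdigits_neg n acc h, bdigits_neg n [] h]; simp
  | succ f ih =>
    intro n hn acc
    by_cases h : 0 < n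
    · have hd : PySem.Int.floordiv n 3 = n / 3 := PySem.Int.floordiv_eq_ediv_of_pos (by omega)
      rw [bdigits_pos n acc h, bdigits_pos n [] h]
      by_cases hr : PySem.Int.mod n 3 = 0
      · rw [if_pos hr, if_pos hr,
            ih (PySem.Int.floordiv n 3 - 1) (by rw [hd]; omega) (3 :: acc),
            ih (PySem.Int.floordiv n 3 - 1) (by rw [hd]; omega) [3]]
        simp
      · rw [if_neg hr, if_neg hr,
            ih (PySem.Int.floordiv n 3) (by rw [hd]; omega) (PySem.Int.mod n 3 :: acc),
            ih (PySem.Int.floordiv n 3) (by rw [hd]; omega) [PySem.Int.mod n 3]]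
        simp
    · rw [bdigits_neg n acc h, bdigits_neg n [] h]; simp

theorem bdigits_succ (n : Nat) :
    bdigits ((n : Int) + 1) [] = bdigits ((n / 3 : Nat) : Int) [] ++ [((n % 3 : Nat) : Int) + 1] := by
  have h1 : (0 : Int) < (n : Int) + 1 := by positivity
  rw [bdigits_pos _ _ h1]
  have hcast : ((n : Int) + 1) = ((n + 1 : Nat) : Int) := by push_cast; ring
  have hmod : PySem.Int.mod ((n : Int) + 1) 3 = (((n + 1) % 3 : Nat) : Int) := by
    rw [hcast]; exact_mod_cast PySem.Int.mod_natCast (n + 1) 3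
  have hdiv : PySem.Int.floordiv ((n : Int) + 1) 3 = (((n + 1) / 3 : Nat) : Int) := by
    rw [hcast]; exact_mod_cast PySem.Int.floordiv_natCast (n + 1) 3
  by_cases hr : (n + 1) % 3 = 0
  · have hz : PySem.Int.mod ((n : Int) + 1) 3 = 0 := by rw [hmod, hr]; simp
    rw [if_pos hz]
    have harg : PySem.Int.floordiv ((n : Int) + 1) 3 - 1 = (((n + 1) / 3 - 1 : Nat) : Int) := by
      rw [hdiv]
      have h3 : 1 ≤ (n + 1) / 3 := by omega
      push_cast [h3]; ring
    rw [harg, bdigits_acc (((n + 1) / 3 - 1 : Nat) : Int).toNat _ le_rfl [3]]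
    have e1 : (n + 1) / 3 - 1 = n / 3 := by omega
    have e2 : n % 3 = 2 := by omega
    rw [e1, e2]; norm_num
  · have hz : ¬ PySem.Int.mod ((n : Int) + 1) 3 = 0 := by
      rw [hmod]; exact_mod_cast (by omega : ¬ ((n + 1) % 3 : Int) = 0)
    rw [if_neg hz, hdiv, bdigits_acc (((n + 1) / 3 : Nat) : Int).toNat _ le_rfl _]
    have e1 : (n + 1) / 3 = n / 3 := by omega
    have e2 : (n + 1) % 3 = n % 3 + 1 := by omega
    rw [hmod, e1, e2]; push_cast; ring_nf

theorem foldl_ten_concat (xs : List Int) (d : Int) : ∀ v : Int,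
    (xs ++ [d]).foldl (fun a b => 10 * a + b) v = 10 * xs.foldl (fun a b => 10 * a + b) v + d := by
  induction xs with
  | nil => intro v; simp
  | cons x xs ih => intro v; simp only [List.cons_append, List.foldl_cons]; exact ih _

-- B's per-index value is fseq
theorem bvalue_eq_fseq : ∀ n : Nat,
    (bdigits ((n : Int)) []).foldl (fun a b => 10 * a + b) 0 = fseq n := by
  intro n
  induction n using Nat.strong_induction_on with
  | _ n ih =>
    match n with
    | 0 => rw [bdigits_neg _ _ (by omega)]; simp [fseq]
    | m + 1 =>
      have hc : ((m + 1 : Nat) : Int) = (m : Int) + 1 := by push_cast; ring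
      rw [hc, bdigits_succ, foldl_ten_concat, ih (m / 3) (by omega)]
      rw [fseq]

-- children relation used by the BFS invariant
theorem fseq_child (k : Nat) (j : Nat) (h1 : 1 ≤ j) (h3 : j ≤ 3) :
    fseq (3 * k + 3 + j) = 10 * fseq (k + 1) + (j : Int) := by
  have h : 3 * k + 3 + j = (3 * k + 2 + j) + 1 := by omega
  rw [h, fseq]
  have e1 : (3 * k + 2 + j) / 3 = k + 1 := by omega
  have e2 : (3 * k + 2 + j) % 3 = j - 1 := by omega
  rw [e1, e2]
  have e3 : ((j - 1 : Nat) : Int) = (j : Int) - 1 := by push_cast [h1]; ring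
  rw [e3]; ring

theorem solveStepA_queue (k : Nat) (ans : List Int) (i : Int) :
    solveStepA ((List.range' (k + 1) (2 * k + 3)).map fseq, ans) i
      = ((List.range' (k + 2) (2 * k + 5)).map fseq, ans ++ [fseq (k + 1)]) := by
  have hq : List.range' (k + 1) (2 * k + 3) = (k + 1) :: List.range' (k + 2) (2 * k + 2) := by
    rw [List.range'_succ]
  rw [hq]
  simp only [List.map_cons, solveStepA]
  have hr : PySem.List.pyRange 1 4 1 = [1, 2, 3] := by decide
  rw [hr]
  simp only [List.foldl_cons, List.foldl_nil, Prod.mk.injEq]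
  refine ⟨?_, trivial⟩
  have hsplit : List.range' (k + 2) (2 * k + 5) = List.range' (k + 2) (2 * k + 2) ++ List.range' (k + 2 + (2 * k + 2)) 3 := by
    have h : List.range' (k + 2) (2 * k + 2) 1 ++ List.range' (k + 2 + 1 * (2 * k + 2)) 3 1
        = List.range' (k + 2) (2 * k + 2 + 3) 1 := List.range'_append
    simp only [one_mul] at h
    rw [show 2 * k + 5 = 2 * k + 2 + 3 by omega, ← h]
  rw [hsplit, List.map_append]
  have h3 : List.range' (k + 2 + (2 * k + 2)) 3 = [3 * k + 4, 3 * k + 5, 3 * k + 6] := by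
    simp [List.range'_succ]; omega
  rw [h3]
  have c1 := fseq_child k 1 (by omega) (by omega)
  have c2 := fseq_child k 2 (by omega) (by omega)
  have c3 := fseq_child k 3 (by omega) (by omega)
  have e1 : 3 * k + 3 + 1 = 3 * k + 4 := by omega
  have e2 : 3 * k + 3 + 2 = 3 * k + 5 := by omega
  have e3 : 3 * k + 3 + 3 = 3 * k + 6 := by omega
  rw [e1] at c1; rw [e2] at c2; rw [e3] at c3
  simp only [List.map_cons, List.map_nil, List.append_assoc, c1, c2, c3]
  norm_num

-- BFS loop invariant: after processing l, ans gains fseq of the next l.length indices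
theorem A_inv (l : List Int) : ∀ (k : Nat) (ans : List Int),
    List.foldl solveStepA ((List.range' (k + 1) (2 * k + 3)).map fseq, ans) l
      = ((List.range' (k + l.length + 1) (2 * (k + l.length) + 3)).map fseq,
         ans ++ (List.range' (k + 1) l.length).map fseq) := by
  induction l with
  | nil => intro k ans; simp
  | cons x xs ih =>
    intro k ans
    rw [List.foldl_cons, solveStepA_queue]
    have h25 : 2 * k + 5 = 2 * (k + 1) + 3 := by omega
    rw [h25, ih (k + 1) (ans ++ [fseq (k + 1)])]
    simp only [Prod.mk.injEq, List.length_cons]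
    refine ⟨?_, ?_⟩
    · have g1 : k + 1 + xs.length + 1 = k + (xs.length + 1) + 1 := by omega
      have g2 : 2 * (k + 1 + xs.length) + 3 = 2 * (k + (xs.length + 1)) + 3 := by omega
      rw [g1, g2]
    · have g3 : List.range' (k + 1) (xs.length + 1) = (k + 1) :: List.range' (k + 2) xs.length := by
        rw [List.range'_succ]
      rw [g3]
      simp [List.append_assoc]

theorem solve_eq_map (A : Int) : solve A = (List.range' 1 A.toNat).map fseq := by
  unfold solve
  have f1 : fseq 1 = 1 := by rw [fseq]; rw [fseq]; norm_num
  have f2 : fseq 2 = 2 := by rw [fseq]; rw [fseq]; norm_num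
  have f3 : fseq 3 = 3 := by rw [fseq]; rw [fseq]; norm_num
  have hinit : ([1, 2, 3] : List Int) = (List.range' (0 + 1) (2 * 0 + 3)).map fseq := by
    simp [List.range'_succ, f1, f2, f3]
  rw [hinit, A_inv]
  simp [PySem.List.length_pyRange_one]

theorem B_inv (n : Nat) : ∀ acc : List Int,
    (List.foldl (fun ans i =>
        ans ++ [(bdigits (i + 1) []).foldl (fun a b => 10 * a + b) 0])
      acc ((List.range n).map (fun (k : Nat) => ((0 : Int) + (k : Int)))))
      = acc ++ (List.range' 1 n).map fseq := by
  induction n with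
  | zero => intro acc; simp
  | succ m ih =>
    intro acc
    rw [List.range_succ, List.map_append, List.foldl_append, ih]
    simp only [List.map_cons, List.map_nil, List.foldl_cons, List.foldl_nil]
    have hv : (bdigits ((0 : Int) + (m : Int) + 1) []).foldl (fun a b => 10 * a + b) 0 = fseq (m + 1) := by
      have hc : ((0 : Int) + (m : Int) + 1) = ((m + 1 : Nat) : Int) := by push_cast; ring
      rw [hc, bvalue_eq_fseq]
    rw [hv, List.range'_1_concat]
    simp [List.append_assoc]
    congr 1
    omega

theorem solve_alt_eq_map (A : Int) : solve_alt A = (List.range' 1 A.toNat).map fseq := by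
  simp only [solve_alt]
  rw [PySem.List.pyRange_one]
  have h0 : (A - 0).toNat = A.toNat := by omega
  rw [h0]
  simpa using B_inv A.toNat []

-- ===== VERDICT (by name: the statement is the Claim_ definition above) =====
theorem solve_spec : Claim_equal_solve := by
  intro A _
  unfold Spec_solve
  rw [solve_eq_map, solve_alt_eq_map]
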